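-- pv_equiv track=rewrite | github.com/robinandreeklund-collab/oneseekv1 | surfsense_backend/app/agents/new_chat/incremental_json_parser.py | _extract_json_string
-- ===== SOURCE A (Python) =====
-- def _extract_json_string(buf: str, start: int) -> str | None:
--     """Extract a JSON string value starting at *start* (after opening quote).
--
--     Handles escape sequences.  Returns ``None`` if no content found.
--     """
--     chars: list[str] = []
--     i = start
--     while i < len(buf):
--         c = buf[i]
--         if c == "\\":
--             # Escape sequence — take next char as-is
--             if i + 1 < len(buf):
--                 next_c = buf[i + 1]
--                 if next_c == "n":
--                     chars.append("\n")
--                 elif next_c == "t":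
--                     chars.append("\t")
--                 elif next_c == '"':
--                     chars.append('"')
--                 elif next_c == "\\":
--                     chars.append("\\")
--                 else:
--                     chars.append(next_c)
--                 i += 2
--             else:
--                 break
--         elif c == '"':
--             # End of string
--             break
--         else:
--             chars.append(c)
--             i += 1
--     return "".join(chars) if chars else None
-- ===== SOURCE B (Python) =====
-- _ESC = {"n": "\n", "t": "\t", '"': '"', "\\": "\\"}
--
--
-- def _extract_json_string(buf: str, start: int) -> str | None:
--     """Two-pass variant: first locate the end of the raw content, then decode
--     escapes in a separate pass over that slice."""
--     n = len(buf)
--     # Pass 1: locate the end of the raw string content.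
--     i = start
--     while i < n:
--         c = buf[i]
--         if c == "\\":
--             if i + 1 >= n:
--                 break  # lone trailing backslash: excluded from the content
--             i += 2
--         elif c == '"':
--             break
--         else:
--             i += 1
--     content = buf[start:i]
--     # Pass 2: decode escape sequences.
--     it = iter(content)
--     out = []
--     for c in it:
--         if c == "\\":
--             nxt = next(it, None)
--             if nxt is None:
--                 out.append("\\")  # unreachable: pass 1 never leaves a lone trailing backslash
--             else:
--                 out.append(_ESC.get(nxt, nxt))
--         else:
--             out.append(c)
--     decoded = "".join(out)
--     return decoded if decoded else None
-- ===== Notes on version B (the rewrite author's own statement) =====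
-- stated objective: alternative
-- what changed: Replaces A's single interleaved scan-and-decode loop (index plus growing char accumulator) by a two-pass decomposition: a first pass that only locates the end index of the raw content, a slice, and a second independent pass that decodes escapes via a lookup table.
-- outside the precondition, e.g. on _extract_json_string('ab', -1): A returns 'bab', B returns 'b'
import Mathlib
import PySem

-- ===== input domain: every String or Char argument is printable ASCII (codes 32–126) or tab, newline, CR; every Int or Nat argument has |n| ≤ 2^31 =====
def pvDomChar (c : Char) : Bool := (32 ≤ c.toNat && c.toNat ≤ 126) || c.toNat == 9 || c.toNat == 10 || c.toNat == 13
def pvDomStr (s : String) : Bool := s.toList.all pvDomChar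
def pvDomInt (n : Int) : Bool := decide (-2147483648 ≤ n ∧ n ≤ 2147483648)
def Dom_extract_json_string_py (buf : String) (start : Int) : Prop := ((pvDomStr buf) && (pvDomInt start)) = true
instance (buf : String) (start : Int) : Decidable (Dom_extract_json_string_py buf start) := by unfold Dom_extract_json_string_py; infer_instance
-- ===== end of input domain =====

-- B replaces A's single interleaved scan-and-decode loop by a two-pass decomposition
-- (locate the content end, then decode escapes over the slice); objective: alternative, not faster.

-- ===== PORT A =====
-- A's while loop: index i, accumulator `chars`, branches in source order.
def extract_json_string_py_loop (l : List Char) (i : Nat) (chars : List Char) : List Char :=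
  if h : i < l.length then
    let c := l.get ⟨i, h⟩
    if c = '\\' then
      if h2 : i + 1 < l.length then
        let next_c := l.get ⟨i + 1, h2⟩
        let app : Char :=
          if next_c = 'n' then '\n'
          else if next_c = 't' then '\t'
          else if next_c = '"' then '"'
          else if next_c = '\\' then '\\'
          else next_c
        extract_json_string_py_loop l (i + 2) (chars ++ [app])
      else chars
    else if c = '"' then chars
    else extract_json_string_py_loop l (i + 1) (chars ++ [c])
  else chars
termination_by l.length - i

def extract_json_string_py (buf : String) (start : Int) : Option String :=
  let chars := extract_json_string_py_loop buf.toList start.toNat []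
  if chars = [] then none else some (String.ofList chars)

-- ===== PORT B =====
-- Pass 1 of Source B: locate the end index of the raw content.
def pvFindEnd (l : List Char) (i : Nat) : Nat :=
  if h : i < l.length then
    let c := l.get ⟨i, h⟩
    if c = '\\' then
      if i + 1 ≥ l.length then i else pvFindEnd l (i + 2)
    else if c = '"' then i
    else pvFindEnd l (i + 1)
  else i
termination_by l.length - i

-- Source B's _ESC.get(nxt, nxt)
def pvEscGet (c : Char) : Char :=
  ((PySem.Dict.ofList [('n', '\n'), ('t', '\t'), ('"', '"'), ('\\', '\\')]).getD c c)

-- Pass 2 of Source B: decode escapes over the content slice.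
def pvDecode : List Char → List Char
  | [] => []
  | '\\' :: [] => ['\\']        -- unreachable on pass-1 output: lone trailing backslash
  | '\\' :: nxt :: rest => pvEscGet nxt :: pvDecode rest
  | c :: rest => c :: pvDecode rest

def extract_json_string_py_alt (buf : String) (start : Int) : Option String :=
  let l := buf.toList
  let s := start.toNat
  let content := (l.take (pvFindEnd l s)).drop s
  let decoded := pvDecode content
  if decoded = [] then none else some (String.ofList decoded)

-- ===== PRECONDITION & SPEC =====
-- Pre_ excludes negative start, on which A either raises IndexError (start < -len(buf), buf nonempty)
-- or returns a value produced by Python's accidental negative-index wraparound (the scan starts in the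
-- tail of the string and then wraps on to its front).
def Pre_extract_json_string_py (_buf : String) (start : Int) : Prop := 0 ≤ start
instance (buf : String) (start : Int) : Decidable (Pre_extract_json_string_py buf start) := by
  unfold Pre_extract_json_string_py; infer_instance

def pvWitness_extract_json_string_py : String × Int := ("say \\\"hi\\\"\" tail", 0)

def Spec_extract_json_string_py (buf : String) (start : Int) (out : Option String) : Prop :=
  out = extract_json_string_py_alt buf start
instance (buf : String) (start : Int) (out : Option String) : Decidable (Spec_extract_json_string_py buf start out) := by
  unfold Spec_extract_json_string_py; infer_instance

-- ===== CLAIM (what is proved, stated in full; the proofs are below) =====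
def Claim_equal_extract_json_string_py : Prop := ∀ (buf : String) (start : Int), Dom_extract_json_string_py buf start → Pre_extract_json_string_py buf start → Spec_extract_json_string_py buf start (extract_json_string_py buf start)

-- ===== LEMMAS AND PROOFS =====

theorem pvFindEnd_ge (l : List Char) (i : Nat) : i ≤ pvFindEnd l i := by
  rw [pvFindEnd]
  by_cases h : i < l.length
  · simp only [dif_pos h]
    by_cases hb : l.get ⟨i, h⟩ = '\\'
    · simp only [hb, if_true]
      split
      · exact le_refl i
      · exact le_trans (by omega) (pvFindEnd_ge l (i + 2))
    · simp only [if_neg hb]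
      split
      · exact le_refl i
      · exact le_trans (by omega) (pvFindEnd_ge l (i + 1))
  · simp only [dif_neg h]; exact le_refl i
termination_by l.length - i

theorem esc_unfold : PySem.Dict.ofList [('n', '\n'), ('t', '\t'), ('"', '"'), ('\\', '\\')]
    = ((((PySem.Dict.empty.insert 'n' '\n').insert 't' '\t').insert '"' '"').insert '\\' '\\') := rfl

theorem pvEscGet_eq (c : Char) :
    pvEscGet c = (if c = 'n' then '\n' else if c = 't' then '\t' else if c = '"' then '"'
                  else if c = '\\' then '\\' else c) := by
  rw [pvEscGet, esc_unfold]
  simp only [PySem.Dict.getD_insert, PySem.Dict.getD_empty]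
  split_ifs <;> simp_all

theorem drop_take_cons (l : List Char) (i e : Nat) (hi : i < l.length) (he : i < e) :
    (l.take e).drop i = l.get ⟨i, hi⟩ :: (l.take e).drop (i + 1) := by
  have h : i < (l.take e).length := by simp [List.length_take]; omega
  rw [List.drop_eq_getElem_cons h]
  simp [List.getElem_take]

theorem pvDecode_cons_ne (c : Char) (hc : c ≠ '\\') (rest : List Char) :
    pvDecode (c :: rest) = c :: pvDecode rest := by
  cases rest <;> simp [pvDecode, hc]

theorem loop_eq (l : List Char) (i : Nat) (chars : List Char) :
    extract_json_string_py_loop l i chars = chars ++ pvDecode ((l.take (pvFindEnd l i)).drop i) := by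
  unfold extract_json_string_py_loop pvFindEnd
  by_cases h : i < l.length
  · simp only [h, dif_pos]
    by_cases hb : l.get ⟨i, h⟩ = '\\'
    · simp only [hb, if_true]
      by_cases h2 : i + 1 < l.length
      · simp only [dif_pos h2, if_neg (by omega : ¬ i + 1 ≥ l.length)]
        have hge := pvFindEnd_ge l (i + 2)
        rw [loop_eq l (i + 2) _,
            drop_take_cons l i (pvFindEnd l (i + 2)) h (by omega),
            drop_take_cons l (i + 1) (pvFindEnd l (i + 2)) h2 (by omega), hb]
        simp [pvDecode, pvEscGet_eq]
      · simp only [dif_neg h2, if_pos (by omega : i + 1 ≥ l.length)]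
        simp [pvDecode]
    · simp only [if_neg hb]
      by_cases hq : l.get ⟨i, h⟩ = '"'
      · simp only [hq, if_true]
        simp [pvDecode]
      · simp only [if_neg hq]
        have hge := pvFindEnd_ge l (i + 1)
        rw [loop_eq l (i + 1) _, drop_take_cons l i (pvFindEnd l (i + 1)) h (by omega),
            pvDecode_cons_ne _ hb]
        simp
  · simp only [h, dif_neg, not_false_iff]
    simp [pvDecode]
termination_by l.length - i

-- ===== VERDICT (by name: the statement is the Claim_ definition above) =====
theorem extract_json_string_py_spec : Claim_equal_extract_json_string_py := by
  intro buf start _ _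
  unfold Spec_extract_json_string_py extract_json_string_py extract_json_string_py_alt
  rw [loop_eq]
  simp
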